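-- pv_equiv track=rewrite | github.com/balslamdunks/travelling_salesman | greedyalgorithm/greedyalgorithm.py | points_for_path
-- ===== SOURCE A (Python) =====
-- def points_for_path(search_list, coordinate_list):
--         coordinate_vals = [] # Generate values that associate with given path found
--         final_vals = []
--         for l in search_list:
--             for m in coordinate_list:
--                 if l in m:
--                     coordinate_vals.append(m)
--         for h in coordinate_vals:
--             final_vals.append((h[1], h[2]))
--
--         return final_vals
-- ===== SOURCE B (Python) =====
-- def points_for_path(search_list, coordinate_list):
--     # Build once: value -> list of rows containing it (row order preserved),
--     # so each search item is one dict lookup instead of a scan of coordinate_list.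
--     index = {}
--     for m in coordinate_list:
--         for v in dict.fromkeys(m):
--             index.setdefault(v, []).append(m)
--     # one chunk of pairs per search item, then flatten
--     chunks = [[(h[1], h[2]) for h in index.get(l, [])] for l in search_list]
--     return [p for chunk in chunks for p in chunk]
-- ===== Notes on version B (the rewrite author's own statement) =====
-- stated objective: faster
-- what changed: B builds a dict from each value to the rows containing it in one pass over coordinate_list, then emits the pairs by a recursive walk over search_list with one dict lookup per item, so A's inner scan of coordinate_list per search item disappears.
import Mathlib
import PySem

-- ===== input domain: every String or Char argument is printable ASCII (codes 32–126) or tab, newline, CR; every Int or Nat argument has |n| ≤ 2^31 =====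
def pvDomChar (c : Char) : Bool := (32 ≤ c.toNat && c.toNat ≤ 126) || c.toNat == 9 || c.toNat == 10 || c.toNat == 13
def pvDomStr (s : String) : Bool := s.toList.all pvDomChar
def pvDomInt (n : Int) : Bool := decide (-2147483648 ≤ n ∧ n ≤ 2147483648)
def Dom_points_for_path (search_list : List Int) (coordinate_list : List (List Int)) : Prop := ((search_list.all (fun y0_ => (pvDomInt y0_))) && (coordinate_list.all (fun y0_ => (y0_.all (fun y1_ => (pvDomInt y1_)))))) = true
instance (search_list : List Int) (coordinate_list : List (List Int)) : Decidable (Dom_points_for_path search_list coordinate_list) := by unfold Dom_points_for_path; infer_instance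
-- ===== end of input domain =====

-- B replaces A's per-search-item scan of coordinate_list by a dict (value -> rows containing it) built once; objective: faster.
-- ===== PORT A =====
-- literal transliteration of A: two accumulation loops (select rows, then extract pairs)
def points_for_path (search_list : List Int) (coordinate_list : List (List Int)) : List (Int × Int) :=
  let coordinate_vals : List (List Int) :=
    search_list.foldl (fun acc l =>
      coordinate_list.foldl (fun acc2 m =>
        if m.contains l then acc2 ++ [m] else acc2) acc) []
  coordinate_vals.foldl (fun fv h =>
    fv ++ [(PySem.List.pyGetD h 1 0, PySem.List.pyGetD h 2 0)]) []

-- ===== PORT B =====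
-- Source B's index-building loop: for m in coordinate_list: for v in dict.fromkeys(m): index.setdefault(v, []).append(m)
def pvBuildIndex : List (List Int) → PySem.Dict Int (List (List Int)) → PySem.Dict Int (List (List Int))
  | [], index => index
  | m :: rest, index =>
      pvBuildIndex rest ((PySem.List.dedup m).foldl (fun d v => d.modify v [] (· ++ [m])) index)

-- Source B's comprehensions: one chunk of pairs per search item, then flatten
def points_for_path_alt (search_list : List Int) (coordinate_list : List (List Int)) : List (Int × Int) :=
  let index := pvBuildIndex coordinate_list PySem.Dict.empty
  let chunks := search_list.map (fun l =>
    (index.getD l []).map (fun h => (PySem.List.pyGetD h 1 0, PySem.List.pyGetD h 2 0)))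
  chunks.flatten

-- ===== PRECONDITION & SPEC =====
-- Pre_ excludes exactly the inputs where A raises IndexError: a row of length < 3 that contains some searched value (h[1]/h[2] out of range).
def Pre_points_for_path (search_list : List Int) (coordinate_list : List (List Int)) : Prop :=
  ∀ m ∈ coordinate_list, (∃ l ∈ search_list, l ∈ m) → 3 ≤ m.length
instance (search_list : List Int) (coordinate_list : List (List Int)) : Decidable (Pre_points_for_path search_list coordinate_list) := by unfold Pre_points_for_path; infer_instance
def pvWitness_points_for_path : List Int × List (List Int) := ([1, 2], [[1, 5, 6], [2, 7, 8], [3, 9]])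

def Spec_points_for_path (search_list : List Int) (coordinate_list : List (List Int)) (out : List (Int × Int)) : Prop := out = points_for_path_alt search_list coordinate_list
instance (search_list : List Int) (coordinate_list : List (List Int)) (out : List (Int × Int)) : Decidable (Spec_points_for_path search_list coordinate_list out) := by unfold Spec_points_for_path; infer_instance

-- ===== CLAIM (what is proved, stated in full; the proofs are below) =====
def Claim_equal_points_for_path : Prop := ∀ (search_list : List Int) (coordinate_list : List (List Int)), Dom_points_for_path search_list coordinate_list → Pre_points_for_path search_list coordinate_list → Spec_points_for_path search_list coordinate_list (points_for_path search_list coordinate_list)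

-- ===== LEMMAS AND PROOFS =====

-- the pair both programs extract from a selected row
def pvPair (h : List Int) : Int × Int := (PySem.List.pyGetD h 1 0, PySem.List.pyGetD h 2 0)

-- A's outer selection loop accumulates, per search item, the rows containing it
lemma foldl_select (cl : List (List Int)) (t : List Int) (init : List (List Int)) :
    t.foldl (fun acc l => cl.foldl (fun acc2 m => if m.contains l then acc2 ++ [m] else acc2) acc) init
      = init ++ t.flatMap (fun l => cl.filter (fun m => m.contains l)) := by
  induction t generalizing init with
  | nil => simp
  | cons x xs ihx =>
    simp only [List.foldl_cons, List.flatMap_cons]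
    rw [PySem.List.foldl_append_if_eq_filter, ihx, List.append_assoc]

-- A computes the flatMap of pvPair over the per-item filtered rows
lemma A_eq (s : List Int) (cl : List (List Int)) :
    points_for_path s cl
      = s.flatMap (fun l => ((cl.filter (fun m => m.contains l)).map pvPair)) := by
  unfold points_for_path
  rw [foldl_select cl s [], List.nil_append,
      show (fun fv (h : List Int) => fv ++ [(PySem.List.pyGetD h 1 0, PySem.List.pyGetD h 2 0)])
        = fun fv h => fv ++ [pvPair h] from rfl,
      PySem.List.foldl_append_singleton_eq_map, List.nil_append, List.map_flatMap]

-- filtering the (value, row) pairs of a duplicate-free value list keeps at most one pair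
lemma filter_map_pair (ds : List Int) (m : List Int) (l : Int) (hnd : ds.Nodup) :
    ((ds.map (fun v => (v, m))).filter (fun p => p.1 == l)).map (·.2) = if l ∈ ds then [m] else [] := by
  induction ds with
  | nil => simp
  | cons x xs ih =>
    rcases List.nodup_cons.1 hnd with ⟨hx, hxs⟩
    simp only [List.map_cons, List.filter_cons]
    by_cases hxl : x = l
    · subst hxl
      have hrest : (xs.map (fun v => (v, m))).filter (fun p => p.1 == x) = [] := by
        rw [List.filter_eq_nil_iff]
        intro p hp
        obtain ⟨v, hv, rfl⟩ := List.mem_map.1 hp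
        simp only [beq_iff_eq]
        intro heq; exact hx (heq ▸ hv)
      simp [hrest]
    · have : ((x, m).1 == l) = false := by simpa using hxl
      simp only [this, Bool.false_eq_true, if_false, ih hxs, List.mem_cons]
      have hlx : ¬ l = x := fun heq => hxl heq.symm
      simp [hlx]

-- the index built by B's first loop looks up to exactly the rows containing the key, in order
lemma index_getD (cl : List (List Int)) (l : Int) (d : PySem.Dict Int (List (List Int))) :
    (pvBuildIndex cl d).getD l [] = d.getD l [] ++ cl.filter (fun m => m.contains l) := by
  induction cl generalizing d with
  | nil => simp [pvBuildIndex]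
  | cons m t ih =>
    simp only [pvBuildIndex, List.filter_cons]
    rw [ih]
    have hinner : ((PySem.List.dedup m).foldl (fun d v => d.modify v [] (· ++ [m])) d).getD l []
        = d.getD l [] ++ (if l ∈ m then [m] else []) := by
      have h := PySem.Dict.getD_foldl_modify_append (l := (PySem.List.dedup m).map (fun v => (v, m))) (d := d) (c := l)
      simp only [List.foldl_map] at h
      rw [h, filter_map_pair _ _ _ (PySem.List.nodup_dedup m)]
      simp
    rw [hinner]
    by_cases hl : l ∈ m <;> simp [hl]

-- B is the same flatMap
lemma B_eq (s : List Int) (cl : List (List Int)) :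
    points_for_path_alt s cl
      = s.flatMap (fun l => ((cl.filter (fun m => m.contains l)).map pvPair)) := by
  unfold points_for_path_alt
  simp only [List.flatten_eq_flatMap, List.flatMap_map]
  apply List.flatMap_congr
  intro l _
  rw [index_getD, PySem.Dict.getD_empty, List.nil_append]
  rfl

-- ===== VERDICT (by name: the statement is the Claim_ definition above) =====
theorem points_for_path_spec : Claim_equal_points_for_path := by
  intro s cl _ _
  unfold Spec_points_for_path
  rw [A_eq, B_eq]
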